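-- pv_equiv track=rewrite | github.com/shindongyeop/algorithms-level-3 | 52_cola.py | solution
-- ===== SOURCE A (Python) =====
-- def solution(a, b, n):
--     answer = 0
--     total_colas = 0
--     new_colas  = 0
--     if n < a:
--         return 0
--     while n >= a:
--         new_colas = (n // a) * b
--         total_colas += new_colas
--         n = (n % a) + new_colas
--     answer = total_colas
--     return answer
-- ===== SOURCE B (Python) =====
-- def solution(a, b, n):
--     # Closed form instead of the exchange loop: each exchange of a empties for b
--     # colas removes a-b bottles from circulation, and the process stops with a
--     # remainder in [b, a); hence total colas = b * ((n - b) // (a - b)).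
--     if n < a:
--         return 0
--     return b * ((n - b) // (a - b))
-- ===== Notes on version B (the rewrite author's own statement) =====
-- stated objective: simpler
-- what changed: Replaces the repeated-exchange while loop by the closed form b*((n-b)//(a-b)), derived from the invariant that each exchange removes a-b bottles and the process stops at a remainder in [b, a).
-- outside the precondition, e.g. on solution(3, -1, 10): A returns -3, B returns -2; on solution(-2, 1, 5): A returns -3, B returns -2
import Mathlib
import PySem

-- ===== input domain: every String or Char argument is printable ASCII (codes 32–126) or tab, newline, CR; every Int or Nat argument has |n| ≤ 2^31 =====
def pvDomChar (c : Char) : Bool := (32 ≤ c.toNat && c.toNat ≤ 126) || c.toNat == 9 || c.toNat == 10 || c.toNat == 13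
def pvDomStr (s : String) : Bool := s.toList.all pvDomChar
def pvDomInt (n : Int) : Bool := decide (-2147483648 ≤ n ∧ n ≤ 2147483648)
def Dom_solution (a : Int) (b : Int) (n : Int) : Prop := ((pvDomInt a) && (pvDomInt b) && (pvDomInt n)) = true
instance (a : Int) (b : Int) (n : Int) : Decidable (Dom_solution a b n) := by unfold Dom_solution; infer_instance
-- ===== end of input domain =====

-- B replaces A's repeated-exchange loop by the closed form b*((n-b)//(a-b)) (simpler).


-- ===== PORT A =====
-- the 'while n >= a' loop; fuel only makes it total in Lean (under Pre_ the
-- bottle count strictly decreases each round, so fuel n.toNat+1 never runs out)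
def solutionLoop (a : Int) (b : Int) : Nat → Int → Int → Int
  | 0, _, total_colas => total_colas
  | fuel + 1, n, total_colas =>
    if n ≥ a then
      let new_colas := (PySem.Int.floordiv n a) * b
      solutionLoop a b fuel (PySem.Int.mod n a + new_colas) (total_colas + new_colas)
    else total_colas

def solution (a : Int) (b : Int) (n : Int) : Int :=
  if n < a then 0
  else solutionLoop a b (n.toNat + 1) n 0

-- ===== PORT B =====
def solution_alt (a : Int) (b : Int) (n : Int) : Int :=
  if n < a then 0
  else b * PySem.Int.floordiv (n - b) (a - b)

-- ===== PRECONDITION & SPEC =====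
-- Pre_ restricts to the natural domain: when an exchange actually happens (n ≥ a)
-- the rate must satisfy 0 ≤ b < a; outside it A diverges (b ≥ a), raises
-- ZeroDivisionError (a = 0), or returns accidental negative totals (b < 0 or a < 0).
def Pre_solution (a : Int) (b : Int) (n : Int) : Prop := n < a ∨ (0 ≤ b ∧ b < a)
instance (a : Int) (b : Int) (n : Int) : Decidable (Pre_solution a b n) := by unfold Pre_solution; infer_instance
def pvWitness_solution : Int × Int × Int := (3, 1, 10)
def Spec_solution (a : Int) (b : Int) (n : Int) (out : Int) : Prop := out = solution_alt a b n
instance (a : Int) (b : Int) (n : Int) (out : Int) : Decidable (Spec_solution a b n out) := by unfold Spec_solution; infer_instance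

-- ===== CLAIM (what is proved, stated in full; the proofs are below) =====
def Claim_equal_solution : Prop := ∀ (a : Int) (b : Int) (n : Int), Dom_solution a b n → Pre_solution a b n → Spec_solution a b n (solution a b n)

-- ===== LEMMAS AND PROOFS =====

-- loop invariant: with 0 ≤ b < a and enough fuel, the loop adds exactly the closed form
lemma solutionLoop_eq (a b : Int) (hb : 0 ≤ b) (hba : b < a) :
    ∀ (fuel : Nat) (n total : Int), n.toNat < fuel →
      solutionLoop a b fuel n total = total + solution_alt a b n := by
  intro fuel
  induction fuel with
  | zero => intro n total h; omega
  | succ f ih =>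
    intro n total hfuel
    have ha : 0 < a := by omega
    by_cases hna : n ≥ a
    · have hfd : PySem.Int.floordiv n a = n / a := PySem.Int.floordiv_eq_ediv_of_pos ha
      have hmd : PySem.Int.mod n a = n % a := PySem.Int.mod_eq_emod_of_pos ha
      set q := n / a with hq
      set r := n % a with hr
      have hqr : a * q + r = n := Int.ediv_add_emod n a
      have hr0 : 0 ≤ r := Int.emod_nonneg n (by omega)
      have hrlt : r < a := Int.emod_lt_of_pos n ha
      have hq1 : 1 ≤ q := by
        rw [hq, Int.le_ediv_iff_mul_le ha]; omega
      set n' := r + q * b with hn'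
      have hlt : n' < n := by nlinarith
      have hn'b : b ≤ n' := by nlinarith
      have hstep : solutionLoop a b (f + 1) n total
          = solutionLoop a b f n' (total + q * b) := by
        simp only [solutionLoop, if_pos hna, hfd, hmd]
        rfl
      rw [hstep, ih n' (total + q * b) (by omega)]
      -- closed-form recurrence: alt n = q*b + alt n'
      have hab : a - b ≠ 0 := by omega
      have hsplit : n - b = (n' - b) + q * (a - b) := by rw [hn']; linear_combination -hqr
      have hdiv : (n - b) / (a - b) = (n' - b) / (a - b) + q := by
        rw [hsplit, Int.add_mul_ediv_right _ _ hab]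
      have haltn : solution_alt a b n = b * ((n' - b) / (a - b) + q) := by
        simp only [solution_alt, if_neg (by omega : ¬ n < a),
          PySem.Int.floordiv_eq_ediv_of_pos (by omega : (0:Int) < a - b), hdiv]
      by_cases hn'a : n' < a
      · have hz : (n' - b) / (a - b) = 0 :=
          Int.ediv_eq_zero_of_lt (by omega) (by omega)
        rw [haltn, hz]
        simp only [solution_alt, if_pos hn'a]
        ring
      · have haltn' : solution_alt a b n' = b * ((n' - b) / (a - b)) := by
          simp only [solution_alt, if_neg hn'a,
            PySem.Int.floordiv_eq_ediv_of_pos (by omega : (0:Int) < a - b)]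
        rw [haltn, haltn']
        ring
    · simp only [solutionLoop, if_neg hna, solution_alt, if_pos (by omega : n < a)]
      ring

-- ===== VERDICT (by name: the statement is the Claim_ definition above) =====
theorem solution_spec : Claim_equal_solution := by
  intro a b n _ hpre
  unfold Spec_solution solution
  by_cases hna : n < a
  · simp [solution_alt, hna]
  · rcases hpre with h | ⟨hb, hba⟩
    · omega
    · rw [if_neg hna, solutionLoop_eq a b hb hba (n.toNat + 1) n 0 (by omega)]
      ring
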